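-- pv_equiv track=rewrite | github.com/aviskase/advent-of-code | day08/puzzle.py | convert_to_layers
-- ===== SOURCE A (Python) =====
-- def convert_to_layers(raw_data, width, height):
--     layer_size = width * height
--     num_of_layers = len(raw_data) // layer_size
--     raw_data = iter(raw_data)
--     layers = []
--     for l in range(num_of_layers):
--         layers.append([])
--         for h in range(height):
--             layers[l].append([])
--             for w in range(width):
--                 layers[l][h].append(int(next(raw_data)))
--     return layers
-- ===== SOURCE B (Python) =====
-- def convert_to_layers(raw_data, width, height):
--     layer_size = width * height
--     num_of_layers = len(raw_data) // layer_size
--     flat = [int(c) for c in raw_data[:num_of_layers * layer_size]]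
--     return [[flat[l * layer_size + h * width : l * layer_size + (h + 1) * width]
--              for h in range(height)]
--             for l in range(num_of_layers)]
-- ===== Notes on version B (the rewrite author's own statement) =====
-- stated objective: simpler
-- what changed: Replaces the fused triple-nested iterator fill with a two-phase convert-then-reshape: first int-convert the consumed prefix into a flat list, then assemble each row as a slice flat[base:base+width], removing the innermost pixel loop and the iterator state.
-- outside the precondition, e.g. on convert_to_layers('ab', -1, -2): A returns [[]], B raises ValueError; on convert_to_layers('ab', 2, -1): A returns [], B raises ValueError
import Mathlib
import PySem

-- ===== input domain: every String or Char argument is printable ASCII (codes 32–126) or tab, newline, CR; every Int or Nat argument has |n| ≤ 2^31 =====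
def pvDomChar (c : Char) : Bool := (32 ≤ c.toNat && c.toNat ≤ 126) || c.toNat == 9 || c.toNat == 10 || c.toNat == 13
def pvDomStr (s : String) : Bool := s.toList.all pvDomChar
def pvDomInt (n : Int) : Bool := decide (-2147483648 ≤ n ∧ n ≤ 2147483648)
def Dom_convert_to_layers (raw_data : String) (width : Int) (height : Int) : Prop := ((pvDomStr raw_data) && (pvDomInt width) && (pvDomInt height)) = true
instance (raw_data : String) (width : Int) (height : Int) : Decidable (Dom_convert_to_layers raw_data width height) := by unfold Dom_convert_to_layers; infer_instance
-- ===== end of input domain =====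

-- B replaces A's fused triple-nested iterator fill by a two-phase convert-then-reshape
-- (flat int list, then row slices by index arithmetic): simpler decomposition, same O(n) cost.


-- int(c) for a single char c (both Pythons convert characters the same way)
def pvConv (c : Char) : Int := (PySem.Int.ofChars? [c]).getD 0

-- ===== PORT A =====
-- the iterator 'raw_data = iter(raw_data)' is ported as a Nat cursor threaded through the folds
def convert_to_layers (raw_data : String) (width : Int) (height : Int) : List (List (List Int)) :=
  let layer_size := width * height
  let num_of_layers := PySem.Int.floordiv (PySem.Str.len raw_data) layer_size
  let chars := raw_data.toList
  ((PySem.List.pyRange 0 num_of_layers 1).foldl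
    (fun (st : List (List (List Int)) × Nat) _ =>
      let inner := (PySem.List.pyRange 0 height 1).foldl
        (fun (st2 : List (List Int) × Nat) _ =>
          let row := (PySem.List.pyRange 0 width 1).foldl
            (fun (st3 : List Int × Nat) _ =>
              (st3.1 ++ [pvConv (PySem.List.pyGetD chars (st3.2 : Int) ' ')], st3.2 + 1))
            ([], st2.2)
          (st2.1 ++ [row.1], row.2))
        ([], st.2)
      (st.1 ++ [inner.1], inner.2))
    ([], 0)).1

-- ===== PORT B =====
def convert_to_layers_alt (raw_data : String) (width : Int) (height : Int) : List (List (List Int)) :=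
  let layer_size := width * height
  let num_of_layers := PySem.Int.floordiv (PySem.Str.len raw_data) layer_size
  let flat := (PySem.List.slice raw_data.toList none (some (num_of_layers * layer_size))).map pvConv
  (PySem.List.pyRange 0 num_of_layers 1).map (fun l =>
    (PySem.List.pyRange 0 height 1).map (fun h =>
      PySem.List.slice flat (some (l * layer_size + h * width)) (some (l * layer_size + (h + 1) * width))))

-- ===== PRECONDITION & SPEC =====
-- Pre_ excludes the inputs where Python A raises (ZeroDivisionError when width*height = 0,
-- ValueError when a consumed character is not a digit); by requiring the whole used prefix to be
-- digits it also excludes inputs with negative dimensions on which A returns empty layers without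
-- reading any character while B's eager conversion of that prefix would raise ValueError.
def Pre_convert_to_layers (raw_data : String) (width : Int) (height : Int) : Prop :=
  width * height ≠ 0 ∧
  ((raw_data.toList.take ((PySem.Int.floordiv (PySem.Str.len raw_data) (width * height) * (width * height)).toNat)).all Char.isDigit) = true
instance (raw_data : String) (width : Int) (height : Int) : Decidable (Pre_convert_to_layers raw_data width height) := by unfold Pre_convert_to_layers; infer_instance

def pvWitness_convert_to_layers : String × Int × Int := ("123456789012", 3, 2)

def Spec_convert_to_layers (raw_data : String) (width : Int) (height : Int) (out : List (List (List Int))) : Prop := out = convert_to_layers_alt raw_data width height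
instance (raw_data : String) (width : Int) (height : Int) (out : List (List (List Int))) : Decidable (Spec_convert_to_layers raw_data width height out) := by unfold Spec_convert_to_layers; infer_instance

-- ===== CLAIM (what is proved, stated in full; the proofs are below) =====
def Claim_equal_convert_to_layers : Prop := ∀ (raw_data : String) (width : Int) (height : Int), Dom_convert_to_layers raw_data width height → Pre_convert_to_layers raw_data width height → Spec_convert_to_layers raw_data width height (convert_to_layers raw_data width height)

-- ===== LEMMAS AND PROOFS =====

-- one 'append a block, advance the cursor by k' loop, characterised
theorem pvBlockFold {β γ : Type} (F : Nat → γ) (k : Nat) (l : List β) :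
    ∀ (acc : List γ) (i : Nat),
      l.foldl (fun st _ => (st.1 ++ [F st.2], st.2 + k)) (acc, i)
        = (acc ++ (List.range l.length).map (fun j => F (i + j * k)), i + l.length * k) := by
  induction l with
  | nil => intro acc i; simp
  | cons x t ih =>
      intro acc i
      simp only [List.foldl_cons, ih, List.length_cons, List.range_succ_eq_map,
        List.map_cons, List.map_map]
      rw [Prod.mk.injEq]
      refine ⟨?_, by ring⟩
      simp only [List.append_assoc, List.singleton_append, Nat.zero_mul, Nat.add_zero]
      congr 1
      congr 1
      apply List.map_congr_left
      intro a _
      congr 1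
      simp only [Nat.succ_eq_add_one]
      ring

theorem pvPyRange_zero_toNat (N : Int) :
    PySem.List.pyRange 0 N 1 = List.map (fun k : Nat => (k : Int)) (List.range N.toNat) := by
  by_cases h : N ≤ 0
  case pos =>
    have : N.toNat = 0 := by omega
    rw [this]
    simp [PySem.List.pyRange]
    omega
  case neg =>
    have hN : N = (N.toNat : Int) := by omega
    conv_lhs => rw [hN]
    exact PySem.List.pyRange_zero_natCast N.toNat

theorem pvDropTake {α : Type} (xs : List α) (d : α) (a n : Nat) (h : a + n ≤ xs.length) :
    (xs.drop a).take n = (List.range n).map (fun j => xs.getD (a + j) d) := by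
  apply List.ext_getElem
  · simp; omega
  · intro i h1 h2
    simp only [List.getElem_take, List.getElem_drop, List.getElem_map, List.getElem_range]
    rw [List.getD_eq_getElem]

theorem pvFloordiv_zero (a : Int) : PySem.Int.floordiv a 0 = 0 := by
  simp [PySem.Int.floordiv]

theorem pvFloordiv_pos_of_pos (a b : Int) (ha : 0 ≤ a) (hq : 0 < PySem.Int.floordiv a b) : 0 < b := by
  rcases lt_trichotomy b 0 with hb | hb | hb
  · exfalso
    have hmul := PySem.Int.floordiv_mul_add_mod a b
    have hmod := (PySem.Int.mod_neg_bounds (a := a) hb).2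
    nlinarith [hq, hmul, hmod]
  · rw [hb, pvFloordiv_zero] at hq; omega
  · exact hb

theorem pvFloordiv_mul_le (a b : Int) (hb : 0 < b) : PySem.Int.floordiv a b * b ≤ a := by
  have hmul := PySem.Int.floordiv_mul_add_mod a b
  have := PySem.Int.mod_nonneg (a := a) hb
  omega

theorem pvRowEq (chars : List Char) (wn hn Nn l hh : Nat)
    (hl : l < Nn) (hhh : hh < hn) (hKle : Nn * (wn * hn) ≤ chars.length) :
    (List.range wn).map
      (fun j => pvConv (PySem.List.pyGetD chars ((0 + l * (hn * wn) + hh * wn + j : Nat) : Int) ' '))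
    = PySem.List.slice
        ((PySem.List.slice chars none (some ((Nn : Int) * ((wn : Int) * (hn : Int))))).map pvConv)
        (some ((l : Int) * ((wn : Int) * (hn : Int)) + (hh : Int) * (wn : Int)))
        (some ((l : Int) * ((wn : Int) * (hn : Int)) + ((hh : Int) + 1) * (wn : Int))) := by
  have hKcast : ((Nn : Int) * ((wn : Int) * (hn : Int))) = ((Nn * (wn * hn) : Nat) : Int) := by
    push_cast; ring
  have ha : ((l : Int) * ((wn : Int) * (hn : Int)) + (hh : Int) * (wn : Int))
      = ((l * (wn * hn) + hh * wn : Nat) : Int) := by push_cast; ring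
  have hb : ((l : Int) * ((wn : Int) * (hn : Int)) + ((hh : Int) + 1) * (wn : Int))
      = (((l * (wn * hn) + hh * wn) + wn : Nat) : Int) := by push_cast; ring
  rw [hKcast, ha, hb, PySem.List.slice_to _ (by positivity), Int.toNat_natCast,
    PySem.List.slice_natCast, Nat.add_sub_cancel_left]
  have hak : l * (wn * hn) + hh * wn + wn ≤ Nn * (wn * hn) := by
    nlinarith [Nat.mul_le_mul_right wn (show hh + 1 ≤ hn by omega),
      Nat.mul_le_mul_right (wn * hn) (show l + 1 ≤ Nn by omega)]
  rw [pvDropTake _ (0 : Int) _ _ (by simp; omega)]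
  apply List.map_congr_left
  intro j hj
  rw [List.mem_range] at hj
  have hidx : l * (wn * hn) + hh * wn + j < chars.length := by omega
  rw [List.getD_eq_getElem _ _ (by simp; omega), List.getElem_map, List.getElem_take]
  have hidxA : 0 + l * (hn * wn) + hh * wn + j = l * (wn * hn) + hh * wn + j := by
    rw [Nat.mul_comm hn wn]; omega
  rw [hidxA, PySem.List.pyGetD_natCast, List.getD_eq_getElem _ _ hidx]

theorem convert_to_layers_eq_alt (raw_data : String) (width height : Int) :
    convert_to_layers raw_data width height = convert_to_layers_alt raw_data width height := by
  unfold convert_to_layers convert_to_layers_alt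
  simp only [pvPyRange_zero_toNat]
  have hrow := pvBlockFold (β := Int)
    (F := fun m : Nat => pvConv (PySem.List.pyGetD raw_data.toList (m : Int) ' ')) (k := 1)
  simp only [hrow, Nat.mul_one, List.length_map, List.length_range, List.nil_append]
  have hmid := pvBlockFold (β := Int)
    (F := fun m : Nat => (List.range width.toNat).map
      (fun j => pvConv (PySem.List.pyGetD raw_data.toList ((m + j : Nat) : Int) ' ')))
    (k := width.toNat)
  simp only [hmid, List.length_map, List.length_range, List.nil_append]
  have houter := pvBlockFold (β := Int)
    (F := fun m : Nat => (List.range height.toNat).map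
      (fun hh => (List.range width.toNat).map
        (fun j => pvConv (PySem.List.pyGetD raw_data.toList ((m + hh * width.toNat + j : Nat) : Int) ' '))))
    (k := height.toNat * width.toNat)
  simp only [houter, List.length_map, List.length_range, List.nil_append, List.map_map]
  have hlen : (0:Int) ≤ PySem.Str.len raw_data := by
    rw [PySem.Str.len_eq]; positivity
  apply List.map_congr_left
  intro l hl
  simp only [Function.comp]
  have hNpos : 0 < PySem.Int.floordiv (PySem.Str.len raw_data) (width * height) := by
    rw [List.mem_range] at hl; omega
  have hls : 0 < width * height :=
    pvFloordiv_pos_of_pos _ _ hlen hNpos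
  apply List.map_congr_left
  intro hh hhh
  simp only [Function.comp]
  rw [List.mem_range] at hl hhh
  have hhpos : 0 < height := by omega
  have hwpos : 0 < width := by nlinarith
  have hweq : width = (width.toNat : Int) := by omega
  have hheq : height = (height.toNat : Int) := by omega
  obtain ⟨Nn, hNe⟩ : ∃ n : Nat,
      PySem.Int.floordiv (PySem.Str.len raw_data) (width * height) = (n : Int) :=
    ⟨_, (Int.toNat_of_nonneg (le_of_lt hNpos)).symm⟩
  have hKle : Nn * (width.toNat * height.toNat) ≤ raw_data.toList.length := by
    have h1 := pvFloordiv_mul_le (PySem.Str.len raw_data) (width * height) hls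
    rw [hNe] at h1
    rw [PySem.Str.len_eq] at h1
    have h2 : ((Nn * (width.toNat * height.toNat) : Nat) : Int)
        = (Nn : Int) * (width * height) := by
      conv_rhs => rw [hweq, hheq]
      push_cast; ring
    omega
  rw [hNe] at hl
  simp only [Int.toNat_natCast] at hl
  rw [hNe, hweq, hheq]
  simp only [Int.toNat_natCast]
  exact pvRowEq raw_data.toList width.toNat height.toNat Nn l hh hl hhh hKle

-- ===== VERDICT (by name: the statement is the Claim_ definition above) =====
theorem convert_to_layers_spec : Claim_equal_convert_to_layers := by
  intro raw_data width height _ _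
  unfold Spec_convert_to_layers
  exact convert_to_layers_eq_alt raw_data width height
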